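-- pv_equiv track=rewrite | github.com/Rehd96/Homeworks | hw4/program01.py | prod_controllo
-- ===== SOURCE A (Python) =====
-- def prod_controllo(ingresso):
--     lista_valori_incontrati = []
--     lista_prosodica = ingresso.copy()
--     numero_massimo_prosodia=0
--
--     for i in range(len(ingresso)):
--
--         if ingresso[i] not in lista_valori_incontrati:
--             lista_valori_incontrati.append(ingresso[i])
--             lista_prosodica[i] = numero_massimo_prosodia
--             numero_massimo_prosodia+=1
--
--         else:
--             lista_prosodica[i] = -1
--
--     return lista_prosodica,lista_valori_incontrati
-- ===== SOURCE B (Python) =====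
-- def prod_controllo(ingresso):
--     # Stateless, index-based characterisation: a position i holds a first
--     # occurrence iff ingresso.index(x) == i; its label is the rank of x in the
--     # first-occurrence-ordered distinct list, recomputed with list.index.
--     lista_valori_incontrati = [x for i, x in enumerate(ingresso)
--                                if ingresso.index(x) == i]
--     lista_prosodica = [lista_valori_incontrati.index(x) if ingresso.index(x) == i else -1
--                        for i, x in enumerate(ingresso)]
--     return lista_prosodica, lista_valori_incontrati
-- ===== Notes on version B (the rewrite author's own statement) =====
-- stated objective: alternative
-- what changed: Replaces A's stateful counter-tracking loop (growing seen-list plus running label counter mutated into a copy of the input) by a stateless index-based characterisation: first occurrences are recognised by ingresso.index(x) == i, the distinct list is a filter of those positions, and each label is recomputed as lista_valori_incontrati.index(x); no accumulator or counter is maintained.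
import Mathlib
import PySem

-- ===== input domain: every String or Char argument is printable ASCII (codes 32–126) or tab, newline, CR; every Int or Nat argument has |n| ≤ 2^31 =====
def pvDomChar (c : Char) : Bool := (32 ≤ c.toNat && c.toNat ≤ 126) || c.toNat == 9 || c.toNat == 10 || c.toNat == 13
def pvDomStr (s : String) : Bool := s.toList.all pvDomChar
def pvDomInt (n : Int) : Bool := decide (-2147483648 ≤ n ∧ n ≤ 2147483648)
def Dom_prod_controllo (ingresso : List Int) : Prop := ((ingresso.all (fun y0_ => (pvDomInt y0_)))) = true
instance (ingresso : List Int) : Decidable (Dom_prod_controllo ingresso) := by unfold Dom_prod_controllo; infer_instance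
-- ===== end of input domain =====

-- B replaces A's stateful counter-tracking loop by a stateless index-based characterisation:
-- first occurrences are recognised by ingresso.index(x) == i and labels are recomputed as
-- ranks in the filtered distinct list. (objective: alternative; not faster)


-- ===== PORT A =====
def prod_controllo (ingresso : List Int) : List Int × List Int :=
  let final := (PySem.List.pyRange 0 (PySem.List.len ingresso) 1).foldl
    (fun (st : List Int × List Int × Int) i =>
      -- i comes from range(len(ingresso)), so ingresso[i] is always in range
      if PySem.List.pyGetD ingresso i 0 ∉ st.2.1 then
        (PySem.List.pySetD st.1 i st.2.2, st.2.1 ++ [PySem.List.pyGetD ingresso i 0], st.2.2 + 1)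
      else
        (PySem.List.pySetD st.1 i (-1), st.2.1, st.2.2))
    (ingresso, ([] : List Int), (0 : Int))
  (final.1, final.2.1)

-- ===== PORT B =====
def prod_controllo_alt (ingresso : List Int) : List Int × List Int :=
  let lv := (PySem.List.enumerate ingresso).filterMap
    (fun p => if (PySem.List.index? ingresso p.2).map (fun k => (k : Int)) = some p.1
              then some p.2 else none)
  -- every element of ingresso occurs in lv, so list.index always succeeds; getD 0 is never taken
  let lp := (PySem.List.enumerate ingresso).map
    (fun p => if (PySem.List.index? ingresso p.2).map (fun k => (k : Int)) = some p.1
              then (((PySem.List.index? lv p.2).getD 0 : Nat) : Int) else -1)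
  (lp, lv)

-- ===== PRECONDITION & SPEC =====
def Spec_prod_controllo (ingresso : List Int) (out : List Int × List Int) : Prop := out = prod_controllo_alt ingresso
instance (ingresso : List Int) (out : List Int × List Int) : Decidable (Spec_prod_controllo ingresso out) := by unfold Spec_prod_controllo; infer_instance

-- ===== CLAIM (what is proved, stated in full; the proofs are below) =====
def Claim_equal_prod_controllo : Prop := ∀ (ingresso : List Int), Dom_prod_controllo ingresso → Spec_prod_controllo ingresso (prod_controllo ingresso)

-- ===== LEMMAS AND PROOFS =====

/-- The dedup step (append if unseen) both proofs are organized around. -/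
def pvStep (acc : List Int) (x : Int) : List Int := if x ∉ acc then acc ++ [x] else acc

/-- Reference recursion: given the values seen so far, produce the label list and final seen list. -/
def pvGo (seen : List Int) : List Int → List Int × List Int
  | [] => ([], seen)
  | x :: xs =>
    if x ∈ seen then
      ((-1 : Int) :: (pvGo seen xs).1, (pvGo seen xs).2)
    else
      ((seen.length : Int) :: (pvGo (seen ++ [x]) xs).1, (pvGo (seen ++ [x]) xs).2)

theorem pvStep_mem {acc : List Int} {y : Int} (h : y ∈ acc) : pvStep acc y = acc := by
  simp [pvStep, h]

theorem pvStep_not_mem {acc : List Int} {y : Int} (h : y ∉ acc) : pvStep acc y = acc ++ [y] := by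
  simp [pvStep, h]

theorem pvMem_foldl_step (l : List Int) (acc : List Int) (x : Int) :
    x ∈ List.foldl pvStep acc l ↔ x ∈ acc ∨ x ∈ l := by
  induction l generalizing acc with
  | nil => simp
  | cons y ys ih =>
    rw [List.foldl_cons, ih (pvStep acc y)]
    by_cases h : y ∈ acc
    · rw [pvStep_mem h]
      constructor
      · rintro (h1 | h2)
        · exact Or.inl h1
        · exact Or.inr (List.mem_cons_of_mem _ h2)
      · rintro (h1 | h2)
        · exact Or.inl h1
        · rcases List.mem_cons.mp h2 with rfl | h3
          · exact Or.inl h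
          · exact Or.inr h3
    · rw [pvStep_not_mem h]
      simp [List.mem_append, or_assoc]

theorem pvFoldl_step_prefix (l : List Int) (acc : List Int) :
    ∃ t, List.foldl pvStep acc l = acc ++ t := by
  induction l generalizing acc with
  | nil => exact ⟨[], by simp⟩
  | cons y ys ih =>
    rw [List.foldl_cons]
    by_cases h : y ∈ acc
    · rw [pvStep_mem h]; exact ih acc
    · rw [pvStep_not_mem h]
      obtain ⟨t, ht⟩ := ih (acc ++ [y])
      exact ⟨y :: t, by rw [ht]; simp⟩

theorem pvGo_snd (l : List Int) (seen : List Int) :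
    (pvGo seen l).2 = List.foldl pvStep seen l := by
  induction l generalizing seen with
  | nil => simp [pvGo]
  | cons x xs ih =>
    rw [List.foldl_cons]
    by_cases h : x ∈ seen
    · rw [pvStep_mem h]
      simp only [pvGo, if_pos h]
      exact ih seen
    · rw [pvStep_not_mem h]
      simp only [pvGo, if_neg h]
      exact ih (seen ++ [x])

theorem pvSet_append_length (done : List Int) (x : Int) (xs : List Int) (v : Int) :
    (done ++ x :: xs).set done.length v = done ++ v :: xs := by
  induction done with
  | nil => simp
  | cons d ds ih => simp [ih]

theorem pvGetD_append_length (pre : List Int) (x : Int) (xs : List Int) (d : Int) :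
    (pre ++ x :: xs).getD pre.length d = x := by
  induction pre with
  | nil => simp
  | cons p ps _ => simp

/-- A's loop, generalized over a split of the input. -/
theorem pvA_loop (cur pre done seen : List Int) (h : done.length = pre.length) :
    ((PySem.List.pyRange (pre.length : Int) ((pre.length : Int) + (cur.length : Int)) 1).foldl
      (fun (st : List Int × List Int × Int) i =>
        if PySem.List.pyGetD (pre ++ cur) i 0 ∉ st.2.1 then
          (PySem.List.pySetD st.1 i st.2.2, st.2.1 ++ [PySem.List.pyGetD (pre ++ cur) i 0], st.2.2 + 1)
        else
          (PySem.List.pySetD st.1 i (-1), st.2.1, st.2.2))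
      (done ++ cur, seen, (seen.length : Int)))
    = (done ++ (pvGo seen cur).1, (pvGo seen cur).2, (((pvGo seen cur).2.length : Int))) := by
  induction cur generalizing pre done seen with
  | nil =>
    rw [PySem.List.pyRange_one_eq_nil (by simp)]
    simp [pvGo]
  | cons x xs ih =>
    rw [PySem.List.pyRange_one_cons (by push_cast [List.length_cons]; omega)]
    rw [List.foldl_cons]
    have hx : PySem.List.pyGetD (pre ++ x :: xs) (pre.length : Int) 0 = x := by
      rw [PySem.List.pyGetD_natCast]; exact pvGetD_append_length pre x xs 0
    have hset : ∀ v : Int, PySem.List.pySetD (done ++ x :: xs) (pre.length : Int) v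
        = (done ++ [v]) ++ xs := by
      intro v
      rw [PySem.List.pySetD_natCast, ← h, pvSet_append_length]
      simp
    have hrange : ((pre.length : Int) + 1) = (((pre ++ [x]).length : Int)) := by
      simp
    have hrange2 : ((pre.length : Int) + ((x :: xs).length : Int))
        = (((pre ++ [x]).length : Int) + (xs.length : Int)) := by
      simp only [List.length_append, List.length_cons, List.length_nil]; push_cast; omega
    have hfull : pre ++ x :: xs = (pre ++ [x]) ++ xs := by simp
    by_cases hmem : x ∈ seen
    · rw [if_neg (by simp only [hx]; simp [hmem])]
      simp only [hset]
      rw [hrange, hrange2, hfull,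
        ih (pre ++ [x]) (done ++ [-1]) seen (by simp only [List.length_append, List.length_cons, List.length_nil, h])]
      simp [pvGo, hmem]
    · rw [if_pos (by simp only [hx]; simpa using hmem)]
      simp only [hx, hset]
      have hc : ((seen.length : Int) + 1) = (((seen ++ [x]).length : Int)) := by simp
      rw [hrange, hrange2, hfull, hc,
        ih (pre ++ [x]) (done ++ [(seen.length : Int)]) (seen ++ [x]) (by simp only [List.length_append, List.length_cons, List.length_nil, h])]
      simp [pvGo, hmem]

/-- B's distinct-list comprehension equals the dedup fold, generalized over a split. -/
theorem pvDistinct (full cur : List Int) :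
    ∀ (pre : List Int) (s : Int), full = pre ++ cur → s = (pre.length : Int) →
    List.foldl pvStep (List.foldl pvStep [] pre) cur
    = List.foldl pvStep [] pre ++ (PySem.List.enumerate cur s).filterMap
        (fun p => if (PySem.List.index? full p.2).map (fun k => (k : Int)) = some p.1
                  then some p.2 else none) := by
  induction cur with
  | nil => intro pre s _ _; simp [PySem.List.enumerate]
  | cons x xs ih =>
    intro pre s hf hs
    subst hs
    rw [PySem.List.enumerate_cons, List.filterMap_cons, List.foldl_cons]
    have hmemseen : x ∈ List.foldl pvStep [] pre ↔ x ∈ pre := by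
      rw [pvMem_foldl_step]; simp
    have hs1 : ((pre.length : Int) + 1) = (((pre ++ [x]).length : Int)) := by simp
    by_cases hmem : x ∈ pre
    · have hidx : PySem.List.index? full x = PySem.List.index? pre x := by
        rw [hf]; exact PySem.List.index?_append_of_mem _ hmem
      obtain ⟨k, hk⟩ : ∃ k, PySem.List.index? pre x = some k :=
        Option.isSome_iff_exists.mp ((PySem.List.index?_isSome_iff pre x).mpr hmem)
      have hklt : k < pre.length := by
        obtain ⟨p, su, hps, hlen, _⟩ := (PySem.List.index?_eq_some_iff pre x k).mp hk
        subst hps; simp at hlen ⊢; omega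
      rw [if_neg (by rw [hidx, hk]; simp; omega)]
      rw [pvStep_mem (hmemseen.mpr hmem)]
      have hS : List.foldl pvStep [] (pre ++ [x]) = List.foldl pvStep [] pre := by
        rw [List.foldl_append, List.foldl_cons, List.foldl_nil, pvStep_mem (hmemseen.mpr hmem)]
      have htail := ih (pre ++ [x]) ((pre.length : Int) + 1) (by rw [hf]; simp) hs1
      rw [hS] at htail
      rw [htail]
    · have hxnotseen : x ∉ List.foldl pvStep [] pre := fun hc => hmem (hmemseen.mp hc)
      have hidx : PySem.List.index? full x = some pre.length := by
        rw [hf]; exact (PySem.List.index?_eq_some_iff _ x _).mpr ⟨pre, xs, rfl, rfl, hmem⟩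
      rw [if_pos (by rw [hidx]; simp)]
      rw [pvStep_not_mem hxnotseen]
      have hS : List.foldl pvStep [] (pre ++ [x]) = List.foldl pvStep [] pre ++ [x] := by
        rw [List.foldl_append, List.foldl_cons, List.foldl_nil, pvStep_not_mem hxnotseen]
      have htail := ih (pre ++ [x]) ((pre.length : Int) + 1) (by rw [hf]; simp) hs1
      rw [hS] at htail
      rw [htail]
      simp

/-- B's labelling comprehension, generalized over a split of the input. -/
theorem pvB_loop (full lv cur : List Int) (hlv : lv = List.foldl pvStep [] full) :
    ∀ (pre : List Int) (s : Int), full = pre ++ cur → s = (pre.length : Int) →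
    (PySem.List.enumerate cur s).map
      (fun p => if (PySem.List.index? full p.2).map (fun k => (k : Int)) = some p.1
                then (((PySem.List.index? lv p.2).getD 0 : Nat) : Int) else -1)
    = (pvGo (List.foldl pvStep [] pre) cur).1 := by
  induction cur with
  | nil => intro pre s _ _; simp [PySem.List.enumerate, pvGo]
  | cons x xs ih =>
    intro pre s hf hs
    subst hs
    rw [PySem.List.enumerate_cons, List.map_cons]
    have hmemseen : x ∈ List.foldl pvStep [] pre ↔ x ∈ pre := by
      rw [pvMem_foldl_step]; simp
    have hs1 : ((pre.length : Int) + 1) = (((pre ++ [x]).length : Int)) := by simp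
    by_cases hmem : x ∈ pre
    · -- repeated value: the first-occurrence index is < i, so the label is -1
      have hidx : PySem.List.index? full x = PySem.List.index? pre x := by
        rw [hf]; exact PySem.List.index?_append_of_mem _ hmem
      obtain ⟨k, hk⟩ : ∃ k, PySem.List.index? pre x = some k :=
        Option.isSome_iff_exists.mp ((PySem.List.index?_isSome_iff pre x).mpr hmem)
      have hklt : k < pre.length := by
        obtain ⟨p, su, hps, hlen, _⟩ := (PySem.List.index?_eq_some_iff pre x k).mp hk
        subst hps; simp at hlen ⊢; omega
      rw [if_neg (by rw [hidx, hk]; simp; omega)]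
      have hseen : List.foldl pvStep [] (pre ++ [x]) = List.foldl pvStep [] pre := by
        rw [List.foldl_append, List.foldl_cons, List.foldl_nil,
          pvStep_mem (hmemseen.mpr hmem)]
      have htail := ih (pre ++ [x]) ((pre.length : Int) + 1) (by rw [hf]; simp) hs1
      rw [hseen] at htail
      rw [htail]
      simp [pvGo, hmemseen.mpr hmem]
    · -- first occurrence: the label is the rank of x among the distinct values
      have hxnotseen : x ∉ List.foldl pvStep [] pre := fun hc => hmem (hmemseen.mp hc)
      have hidx : PySem.List.index? full x = some pre.length := by
        rw [hf]; exact (PySem.List.index?_eq_some_iff _ x _).mpr ⟨pre, xs, rfl, rfl, hmem⟩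
      rw [if_pos (by rw [hidx]; simp)]
      have hseen1 : List.foldl pvStep [] (pre ++ [x])
          = List.foldl pvStep [] pre ++ [x] := by
        rw [List.foldl_append, List.foldl_cons, List.foldl_nil, pvStep_not_mem hxnotseen]
      have hlvx : PySem.List.index? lv x
          = some (List.foldl pvStep [] pre).length := by
        rw [hlv, hf, show pre ++ x :: xs = (pre ++ [x]) ++ xs by simp,
          List.foldl_append, hseen1]
        obtain ⟨t, ht⟩ := pvFoldl_step_prefix xs (List.foldl pvStep [] pre ++ [x])
        rw [ht, PySem.List.index?_append_of_mem _ (by simp),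
          PySem.List.index?_append_singleton_self _ x hxnotseen]
      rw [hlvx]
      have htail := ih (pre ++ [x]) ((pre.length : Int) + 1) (by rw [hf]; simp) hs1
      rw [hseen1] at htail
      rw [htail]
      simp [pvGo, hxnotseen]

-- ===== VERDICT (by name: the statement is the Claim_ definition above) =====
theorem prod_controllo_spec : Claim_equal_prod_controllo := by
  intro ingresso _
  unfold Spec_prod_controllo
  show prod_controllo ingresso = prod_controllo_alt ingresso
  have hA := pvA_loop ingresso [] [] [] rfl
  simp only [List.length_nil, Nat.cast_zero, List.nil_append, zero_add] at hA
  have hD := pvDistinct ingresso ingresso [] 0 rfl rfl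
  simp only [prod_controllo, prod_controllo_alt, PySem.List.len_eq]
  rw [hA]
  exact Prod.ext ((pvB_loop ingresso _ ingresso hD.symm [] 0 rfl rfl).symm)
    ((pvGo_snd ingresso []).trans hD)
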